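-- pv_equiv track=rewrite | github.com/biraj21/cs50_ai | 1_knowledge/logic.py | parenthesize
-- ===== SOURCE A (Python) =====
-- def parenthesize(s: str):
--     def is_balanced(s):
--         count = 0
--         for c in s:
--             if c == "(":
--                 count += 1
--             elif c == ")":
--                 if count <= 0:
--                     return False
--
--                 count -= 1
--
--         return count == 0
--
--     # if s.isalpha() is True, then it's a Symbol so we don't parenthesize it
--     if len(s) == 0 or s.isalpha() or (
--         s[0] == "(" and s[-1] == ")" and is_balanced(s[1:-1])
--     ):
--         return s
--
--     return f"({s})"
-- ===== SOURCE B (Python) =====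
-- def parenthesize(s: str):
--     # B: decide redundant outer parens by Dyck reduction: filter the interior's
--     # parentheses, then repeatedly delete literal "()" pairs; empty residue <=> balanced.
--     if len(s) == 0 or s.isalpha():
--         return s
--     if s[0] == "(" and s[-1] == ")":
--         p = "".join(c for c in s[1:-1] if c in "()")
--         while "()" in p:
--             p = p.replace("()", "")
--         if p == "":
--             return s
--     return f"({s})"
-- ===== Notes on version B (the rewrite author's own statement) =====
-- stated objective: alternative
-- what changed: Replaces the counter-based is_balanced scan of the interior with a Dyck-reduction: filter the interior to its parentheses, then repeatedly delete adjacent open-close pairs via str.replace in a while loop; the outer pair is redundant iff the residue is empty.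
import Mathlib
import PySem

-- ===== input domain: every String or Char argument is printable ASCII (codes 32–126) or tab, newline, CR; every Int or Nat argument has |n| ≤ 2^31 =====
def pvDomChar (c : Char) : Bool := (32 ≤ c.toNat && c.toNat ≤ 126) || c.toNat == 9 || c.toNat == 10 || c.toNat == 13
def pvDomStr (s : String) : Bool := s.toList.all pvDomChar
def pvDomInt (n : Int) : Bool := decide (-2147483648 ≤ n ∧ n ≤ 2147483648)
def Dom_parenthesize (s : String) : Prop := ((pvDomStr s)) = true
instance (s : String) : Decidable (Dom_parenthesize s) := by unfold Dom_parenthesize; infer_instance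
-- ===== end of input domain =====

-- B replaces A's counter-based is_balanced over the sliced interior by a Dyck reduction:
-- filter the interior to its parentheses and repeatedly delete "()" pairs (objective: alternative).

-- ===== PORT A =====
-- nested helper is_balanced, with Python's early 'return False'
def pvIsBalanced : List Char → Int → Bool
  | [], count => count == 0
  | c :: rest, count =>
    if c = '(' then pvIsBalanced rest (count + 1)
    else if c = ')' then
      if count ≤ 0 then false
      else pvIsBalanced rest (count - 1)
    else pvIsBalanced rest count

def parenthesize (s : String) : String :=
  let cs := s.toList
  if (cs.length : Int) = 0 ∨ PySem.Chars.strIsalpha cs = true ∨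
      (PySem.List.pyGet? cs 0 = some '(' ∧ PySem.List.pyGet? cs (-1) = some ')' ∧
        pvIsBalanced (PySem.List.slice cs (some 1) (some (-1))) 0 = true)
  then s
  else String.ofList ('(' :: cs ++ [')'])

-- ===== PORT B =====
-- ''.join(c for c in s[1:-1] if c in "()")
def pvFilterParens (cs : List Char) : List Char := cs.filter (fun c => c == '(' || c == ')')

-- p.replace("()", "") : one left-to-right non-overlapping pass deleting "()"
def pvRepl : List Char → List Char
  | [] => []
  | [c] => [c]
  | c1 :: c2 :: rest =>
    if c1 = '(' ∧ c2 = ')' then pvRepl rest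
    else c1 :: pvRepl (c2 :: rest)
termination_by l => l.length
decreasing_by all_goals (simp only [List.length_cons]; omega)

-- '"()" in p'
def pvHasPair : List Char → Bool
  | [] => false
  | [_] => false
  | c1 :: c2 :: rest => (c1 = '(' && c2 = ')') || pvHasPair (c2 :: rest)
termination_by l => l.length
decreasing_by simp only [List.length_cons]; omega

-- termination lemmas for the while loop (cited by pvLoop's decreasing_by)
theorem pvRepl_length_le (q : List Char) : (pvRepl q).length ≤ q.length := by
  induction q using pvRepl.induct with
  | case1 => simp [pvRepl]
  | case2 => simp [pvRepl]
  | case3 c1 c2 rest h ih =>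
    simp only [pvRepl]
    rw [if_pos h]; simp only [List.length_cons]; omega
  | case4 c1 c2 rest h ih =>
    simp only [pvRepl]
    rw [if_neg h]; simp only [List.length_cons] at ih ⊢; omega

theorem pvRepl_length_lt (q : List Char) (h : pvHasPair q = true) :
    (pvRepl q).length < q.length := by
  induction q using pvRepl.induct with
  | case1 => simp [pvHasPair] at h
  | case2 => simp [pvHasPair] at h
  | case3 c1 c2 rest hp ih =>
    simp only [pvRepl]
    rw [if_pos hp]
    have := pvRepl_length_le rest; simp only [List.length_cons]; omega
  | case4 c1 c2 rest hp ih =>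
    simp only [pvRepl]
    rw [if_neg hp]
    have hh : pvHasPair (c2 :: rest) = true := by
      simp only [pvHasPair, Bool.or_eq_true, Bool.and_eq_true, decide_eq_true_eq] at h
      rcases h with h' | h'
      · exact absurd h' hp
      · exact h'
    have := ih hh; simp only [List.length_cons] at this ⊢; omega

-- while "()" in p: p = p.replace("()", "")
def pvLoop (p : List Char) : List Char :=
  if h : pvHasPair p = true then pvLoop (pvRepl p) else p
termination_by p.length
decreasing_by exact pvRepl_length_lt p h

def parenthesize_alt (s : String) : String :=
  let cs := s.toList
  if (cs.length : Int) = 0 ∨ PySem.Chars.strIsalpha cs = true then s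
  else if PySem.List.pyGet? cs 0 = some '(' ∧ PySem.List.pyGet? cs (-1) = some ')' then
    if pvLoop (pvFilterParens (PySem.List.slice cs (some 1) (some (-1)))) = [] then s
    else String.ofList ('(' :: cs ++ [')'])
  else String.ofList ('(' :: cs ++ [')'])

-- ===== PRECONDITION & SPEC =====
def Spec_parenthesize (s : String) (out : String) : Prop := out = parenthesize_alt s
instance (s : String) (out : String) : Decidable (Spec_parenthesize s out) := by unfold Spec_parenthesize; infer_instance

-- ===== CLAIM (what is proved, stated in full; the proofs are below) =====
def Claim_equal_parenthesize : Prop := ∀ (s : String), Dom_parenthesize s → Spec_parenthesize s (parenthesize s)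

-- ===== LEMMAS AND PROOFS =====

-- step equations
theorem pvRepl_cons2 (c1 c2 : Char) (rest : List Char) :
    pvRepl (c1 :: c2 :: rest) =
      if c1 = '(' ∧ c2 = ')' then pvRepl rest else c1 :: pvRepl (c2 :: rest) := by
  simp only [pvRepl]

theorem pvHasPair_cons2 (c1 c2 : Char) (rest : List Char) :
    pvHasPair (c1 :: c2 :: rest) = ((c1 = '(' && c2 = ')') || pvHasPair (c2 :: rest)) := by
  simp only [pvHasPair]

theorem pvLoop_eq (p : List Char) :
    pvLoop p = if pvHasPair p = true then pvLoop (pvRepl p) else p := by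
  rw [pvLoop, dite_eq_ite]

theorem bal_open (r : List Char) (c : Int) :
    pvIsBalanced ('(' :: r) c = pvIsBalanced r (c + 1) := by
  simp [pvIsBalanced]

theorem bal_close (r : List Char) (c : Int) :
    pvIsBalanced (')' :: r) c = if c ≤ 0 then false else pvIsBalanced r (c - 1) := by
  simp [pvIsBalanced]

theorem bal_other (a : Char) (r : List Char) (c : Int) (h1 : a ≠ '(') (h2 : a ≠ ')') :
    pvIsBalanced (a :: r) c = pvIsBalanced r c := by
  simp only [pvIsBalanced]
  rw [if_neg h1, if_neg h2]

def AllParen (q : List Char) : Prop := ∀ c ∈ q, c = '(' ∨ c = ')'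

-- non-paren characters are transparent to is_balanced: filtering does not change it
theorem bal_filter (u : List Char) : ∀ c : Int, pvIsBalanced u c = pvIsBalanced (pvFilterParens u) c := by
  induction u with
  | nil => intro c; rfl
  | cons a r ih =>
    intro c
    unfold pvFilterParens at ih ⊢
    rw [List.filter_cons]
    by_cases h1 : a = '('
    · subst h1
      rw [if_pos (by decide), bal_open, bal_open, ih]
    · by_cases h2 : a = ')'
      · subst h2
        rw [if_pos (by decide), bal_close, bal_close]
        by_cases hc : c ≤ 0
        · rw [if_pos hc, if_pos hc]
        · rw [if_neg hc, if_neg hc, ih]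
      · rw [if_neg (by simp [h1, h2]), bal_other a r c h1 h2, ih]

-- deleting "()" pairs preserves is_balanced (for nonnegative running count)
theorem bal_repl (q : List Char) : ∀ c : Int, 0 ≤ c → pvIsBalanced (pvRepl q) c = pvIsBalanced q c := by
  induction q using pvRepl.induct with
  | case1 => intro c _; simp [pvRepl]
  | case2 => intro c _; simp [pvRepl]
  | case3 c1 c2 rest h ih =>
    intro c hc
    obtain ⟨h1, h2⟩ := h; subst h1; subst h2
    rw [pvRepl_cons2, if_pos ⟨rfl, rfl⟩, bal_open, bal_close,
      if_neg (by omega : ¬ c + 1 ≤ 0)]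
    rw [ih c hc]
    norm_num
  | case4 c1 c2 rest h ih =>
    intro c hc
    rw [pvRepl_cons2, if_neg h]
    by_cases h1 : c1 = '('
    · subst h1
      rw [bal_open, bal_open]
      exact ih (c + 1) (by omega)
    · by_cases h2 : c1 = ')'
      · subst h2
        rw [bal_close, bal_close]
        by_cases hc0 : c ≤ 0
        · rw [if_pos hc0, if_pos hc0]
        · rw [if_neg hc0, if_neg hc0]
          exact ih (c - 1) (by omega)
      · rw [bal_other c1 _ c h1 h2, bal_other c1 _ c h1 h2]
        exact ih c hc

theorem repl_all_paren (q : List Char) (h : AllParen q) : AllParen (pvRepl q) := by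
  induction q using pvRepl.induct with
  | case1 => intro c hc; simp [pvRepl] at hc
  | case2 c =>
    intro d hd
    rw [show pvRepl [c] = [c] from by simp [pvRepl]] at hd
    exact h d hd
  | case3 c1 c2 rest hp ih =>
    rw [pvRepl_cons2, if_pos hp]
    exact ih (fun c hc => h c (by simp [hc]))
  | case4 c1 c2 rest hp ih =>
    rw [pvRepl_cons2, if_neg hp]
    intro c hc
    rcases List.mem_cons.mp hc with h' | h'
    · exact h c (by simp [h'])
    · exact ih (fun d hd => h d (List.mem_cons_of_mem _ hd)) c h'

-- a parenthesis-only word without "()" that starts with '(' consists of '(' only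
theorem shape_open (r : List Char) : AllParen ('(' :: r) → pvHasPair ('(' :: r) = false →
    ∀ c ∈ '(' :: r, c = '(' := by
  induction r with
  | nil => intro _ _ c hc; simpa using hc
  | cons b r' ih =>
    intro hall hnp
    have hb : b = '(' := by
      rcases hall b (by simp) with h | h
      · exact h
      · exfalso
        rw [pvHasPair_cons2] at hnp
        simp [h] at hnp
    subst hb
    have hnp' : pvHasPair ('(' :: r') = false := by
      rw [pvHasPair_cons2] at hnp
      exact (Bool.or_eq_false_iff.mp hnp).2
    have hall' : AllParen ('(' :: r') := by
      intro c hc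
      rcases List.mem_cons.mp hc with h | h
      · exact Or.inl h
      · exact hall c (by simp [h])
    intro c hc
    rcases List.mem_cons.mp hc with h | h
    · exact h
    · exact ih hall' hnp' c h

-- a nonempty all-'(' word is never balanced for nonnegative count
theorem open_not_bal : ∀ (q : List Char), (∀ c ∈ q, c = '(') →
    q ≠ [] → ∀ c : Int, 0 ≤ c → pvIsBalanced q c = false := by
  intro q
  induction q with
  | nil => intro _ h; exact absurd rfl h
  | cons a r ih =>
    intro hall _ c hc
    have ha : a = '(' := hall a (by simp)
    subst ha
    rw [bal_open]
    cases r with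
    | nil => simp [pvIsBalanced]; omega
    | cons b r' =>
      exact ih (fun d hd => hall d (List.mem_cons_of_mem _ hd)) (by simp) (c + 1) (by omega)

theorem nopair_bal_nil (q : List Char) (hall : AllParen q)
    (hnp : pvHasPair q = false) (hbal : pvIsBalanced q 0 = true) : q = [] := by
  cases q with
  | nil => rfl
  | cons a r =>
    by_cases h1 : a = '('
    · subst h1
      have hopen := shape_open r hall hnp
      have := open_not_bal ('(' :: r) hopen (by simp) 0 le_rfl
      rw [this] at hbal
      exact absurd hbal (by simp)
    · have h2 : a = ')' := by
        rcases hall a (by simp) with h | h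
        · exact absurd h h1
        · exact h
      subst h2
      rw [bal_close, if_pos le_rfl] at hbal
      exact absurd hbal (by simp)

-- the while loop empties q exactly when q is balanced
theorem loop_iff (q : List Char) : AllParen q →
    (pvLoop q = [] ↔ pvIsBalanced q 0 = true) := by
  induction q using pvLoop.induct with
  | case1 q h ih =>
    intro hall
    rw [pvLoop_eq, if_pos h]
    rw [ih (repl_all_paren q hall), bal_repl q 0 le_rfl]
  | case2 q h =>
    intro hall
    rw [pvLoop_eq, if_neg h]
    constructor
    · rintro rfl; rfl
    · exact nopair_bal_nil q hall (by simpa using h)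

theorem filter_all (u : List Char) : AllParen (pvFilterParens u) := by
  intro c hc
  have := List.of_mem_filter hc
  simpa using this

theorem parenthesize_eq (s : String) : parenthesize s = parenthesize_alt s := by
  unfold parenthesize parenthesize_alt
  have key : pvIsBalanced (PySem.List.slice s.toList (some 1) (some (-1))) 0 = true ↔
      pvLoop (pvFilterParens (PySem.List.slice s.toList (some 1) (some (-1)))) = [] := by
    rw [bal_filter]
    exact (loop_iff _ (filter_all _)).symm
  by_cases h0 : ((s.toList.length : Int) = 0 ∨ PySem.Chars.strIsalpha s.toList = true)
  · rw [if_pos (by tauto), if_pos h0]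
  · rw [if_neg h0]
    by_cases hg : (PySem.List.pyGet? s.toList 0 = some '(' ∧ PySem.List.pyGet? s.toList (-1) = some ')')
    · rw [if_pos hg]
      by_cases hl : pvLoop (pvFilterParens (PySem.List.slice s.toList (some 1) (some (-1)))) = []
      · rw [if_pos hl, if_pos (Or.inr (Or.inr ⟨hg.1, hg.2, key.mpr hl⟩))]
      · rw [if_neg hl, if_neg (fun hcon => by
          rcases hcon with h | h | ⟨-, -, hb⟩
          · exact h0 (Or.inl h)
          · exact h0 (Or.inr h)
          · exact hl (key.mp hb))]
    · rw [if_neg hg, if_neg (fun hcon => by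
        rcases hcon with h | h | ⟨ha, hb, -⟩
        · exact h0 (Or.inl h)
        · exact h0 (Or.inr h)
        · exact hg ⟨ha, hb⟩)]

-- ===== VERDICT (by name: the statement is the Claim_ definition above) =====
theorem parenthesize_spec : Claim_equal_parenthesize := by
  intro s _
  unfold Spec_parenthesize
  exact parenthesize_eq s
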